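-- pv_equiv track=rewrite | github.com/leonardocjr/data-lakehouse-renewable-energy | dags/dag_solar_capacity_factor.py | _select_respondents_from_weights
-- ===== SOURCE A (Python) =====
-- from typing import Dict, Iterable, List
--
-- def _select_respondents_from_weights(
--     states: Iterable[str], respondent_weights: Dict[str, Dict[str, float]]
-- ) -> List[str]:
--     wanted = set()
--     state_set = set(states)
--     for respondent, state_weights in respondent_weights.items():
--         if state_set.intersection(state_weights.keys()):
--             wanted.add(respondent)
--     return sorted(wanted)
-- ===== SOURCE B (Python) =====
-- def _select_respondents_from_weights(states, respondent_weights):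
--     # Inverted index: state key -> respondents mentioning it; then union over wanted states.
--     index = {}
--     for respondent, state_weights in respondent_weights.items():
--         for key in state_weights:
--             index.setdefault(key, []).append(respondent)
--     selected = set()
--     for state in set(states):
--         selected.update(index.get(state, []))
--     return sorted(selected)
-- ===== Notes on version B (the rewrite author's own statement) =====
-- stated objective: alternative
-- what changed: Replaces the per-respondent set-intersection scan with an inverted index from state key to respondents, then unions the index entries of the wanted states and sorts the result.
import Mathlib
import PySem

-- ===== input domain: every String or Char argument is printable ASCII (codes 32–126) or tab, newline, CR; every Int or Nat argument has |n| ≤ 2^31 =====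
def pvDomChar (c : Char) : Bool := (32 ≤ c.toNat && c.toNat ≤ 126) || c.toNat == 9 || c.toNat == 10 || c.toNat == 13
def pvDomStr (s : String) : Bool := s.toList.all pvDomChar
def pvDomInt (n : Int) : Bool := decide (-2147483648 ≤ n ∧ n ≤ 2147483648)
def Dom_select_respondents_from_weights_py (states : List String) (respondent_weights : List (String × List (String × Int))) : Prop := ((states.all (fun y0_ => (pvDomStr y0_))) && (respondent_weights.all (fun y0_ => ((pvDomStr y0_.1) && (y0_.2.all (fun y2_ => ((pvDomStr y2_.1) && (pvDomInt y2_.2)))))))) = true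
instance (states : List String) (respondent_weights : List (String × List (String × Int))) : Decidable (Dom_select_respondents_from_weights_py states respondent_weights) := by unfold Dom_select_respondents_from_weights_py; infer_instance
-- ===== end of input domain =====

-- ===== PORT A =====
-- B builds an inverted index (state key -> respondents) and unions the wanted states,
-- instead of A's per-respondent intersection scan; return value proved equal.
def select_respondents_from_weights_py (states : List String) (respondent_weights : List (String × List (String × Int))) : List String :=
  let state_set := PySem.Set.ofList states
  let wanted := respondent_weights.foldl
    (fun wanted p =>
      if PySem.Set.inter state_set (p.2.map Prod.fst) ≠ [] then PySem.Set.add wanted p.1 else wanted)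
    PySem.Set.empty
  PySem.List.sorted wanted (fun x => x) false

-- ===== PORT B =====
-- index.setdefault(key, []).append(respondent) is exactly Dict.modify key [] (· ++ [respondent])
def pvBuildIndex (respondent_weights : List (String × List (String × Int))) : PySem.Dict String (List String) :=
  respondent_weights.foldl
    (fun idx p => p.2.foldl (fun idx kv => idx.modify kv.1 [] (fun l => l ++ [p.1])) idx)
    PySem.Dict.empty

def select_respondents_from_weights_py_alt (states : List String) (respondent_weights : List (String × List (String × Int))) : List String :=
  let index := pvBuildIndex respondent_weights
  let selected := (PySem.Set.ofList states).foldl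
    (fun s st => PySem.Set.update s (index.getD st [])) PySem.Set.empty
  PySem.List.sorted selected (fun x => x) false

-- ===== PRECONDITION & SPEC =====
def Spec_select_respondents_from_weights_py (states : List String) (respondent_weights : List (String × List (String × Int))) (out : List String) : Prop := out = select_respondents_from_weights_py_alt states respondent_weights
instance (states : List String) (respondent_weights : List (String × List (String × Int))) (out : List String) : Decidable (Spec_select_respondents_from_weights_py states respondent_weights out) := by unfold Spec_select_respondents_from_weights_py; infer_instance

-- ===== CLAIM (what is proved, stated in full; the proofs are below) =====
def Claim_equal_select_respondents_from_weights_py : Prop := ∀ (states : List String) (respondent_weights : List (String × List (String × Int))), Dom_select_respondents_from_weights_py states respondent_weights → Spec_select_respondents_from_weights_py states respondent_weights (select_respondents_from_weights_py states respondent_weights)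

-- ===== LEMMAS AND PROOFS =====

-- membership in one respondent's pass over the index
theorem mem_getD_inner (l : List (String × Int)) (d : PySem.Dict String (List String)) (r r' k : String) :
    r' ∈ (l.foldl (fun d kv => d.modify kv.1 [] (fun acc => acc ++ [r])) d).getD k [] ↔
      r' ∈ d.getD k [] ∨ (r' = r ∧ k ∈ l.map Prod.fst) := by
  induction l generalizing d with
  | nil => simp
  | cons kv tl ih =>
    simp only [List.foldl_cons, ih, PySem.Dict.getD_modify, List.map_cons, List.mem_cons]
    by_cases h : k = kv.1 <;> (simp [h]; try tauto)

-- membership in the full inverted index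
theorem mem_getD_index (rw : List (String × List (String × Int))) (d : PySem.Dict String (List String)) (r' k : String) :
    r' ∈ (rw.foldl (fun idx p => p.2.foldl (fun idx kv => idx.modify kv.1 [] (fun l => l ++ [p.1])) idx) d).getD k [] ↔
      r' ∈ d.getD k [] ∨ ∃ p ∈ rw, p.1 = r' ∧ k ∈ p.2.map Prod.fst := by
  induction rw generalizing d with
  | nil => simp
  | cons p tl ih =>
    simp only [List.foldl_cons, ih, mem_getD_inner, List.mem_cons]
    constructor
    · rintro (⟨h | ⟨rfl, hk⟩⟩ | ⟨q, hq, h1, h2⟩)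
      · exact Or.inl h
      · exact Or.inr ⟨p, Or.inl rfl, rfl, hk⟩
      · exact Or.inr ⟨q, Or.inr hq, h1, h2⟩
    · rintro (h | ⟨q, hq | hq, h1, h2⟩)
      · exact Or.inl (Or.inl h)
      · subst hq; exact Or.inl (Or.inr ⟨h1.symm, h2⟩)
      · exact Or.inr ⟨q, hq, h1, h2⟩

-- membership in B's union loop
theorem mem_foldl_update {α : Type} [BEq α] [LawfulBEq α] (sts : List String) (f : String → List α) (s : PySem.Set α) (y : α) :
    y ∈ sts.foldl (fun s st => PySem.Set.update s (f st)) s ↔ y ∈ s ∨ ∃ st ∈ sts, y ∈ f st := by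
  induction sts generalizing s with
  | nil => simp
  | cons st tl ih => simp [List.foldl_cons, ih, PySem.Set.mem_update]; tauto

theorem nodup_foldl_update {α : Type} [BEq α] [LawfulBEq α] (sts : List String) (f : String → List α) (s : PySem.Set α) (h : s.Nodup) :
    (sts.foldl (fun s st => PySem.Set.update s (f st)) s).Nodup := by
  induction sts generalizing s with
  | nil => exact h
  | cons st tl ih => exact ih _ (PySem.Set.nodup_update _ _ h)

-- membership in A's filter loop
theorem mem_foldl_add_if (rw : List (String × List (String × Int))) (c : String × List (String × Int) → Prop)
    [DecidablePred c] (w : PySem.Set String) (y : String) :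
    y ∈ rw.foldl (fun w p => if c p then PySem.Set.add w p.1 else w) w ↔
      y ∈ w ∨ ∃ p ∈ rw, c p ∧ p.1 = y := by
  induction rw generalizing w with
  | nil => simp
  | cons p tl ih =>
    simp only [List.foldl_cons, List.mem_cons]
    by_cases h : c p
    · simp [h, ih, PySem.Set.mem_add]; tauto
    · simp [h, ih]
      try tauto

theorem nodup_foldl_add_if (rw : List (String × List (String × Int))) (c : String × List (String × Int) → Prop)
    [DecidablePred c] (w : PySem.Set String) (h : w.Nodup) :
    (rw.foldl (fun w p => if c p then PySem.Set.add w p.1 else w) w).Nodup := by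
  induction rw generalizing w with
  | nil => exact h
  | cons p tl ih =>
    simp only [List.foldl_cons]
    split
    · exact ih _ (PySem.Set.nodup_add _ _ h)
    · exact ih _ h

theorem inter_ne_nil_iff {α : Type} [BEq α] [LawfulBEq α] (s t : List α) :
    PySem.Set.inter s t ≠ [] ↔ ∃ x, x ∈ s ∧ x ∈ t := by
  constructor
  · intro h
    obtain ⟨x, hx⟩ := List.exists_mem_of_ne_nil _ h
    exact ⟨x, (PySem.Set.mem_inter _ _ _).1 hx⟩
  · rintro ⟨x, hx⟩ hnil
    have := (PySem.Set.mem_inter s t x).2 hx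
    simp [hnil] at this

-- ===== VERDICT (by name: the statement is the Claim_ definition above) =====
theorem select_respondents_from_weights_py_spec : Claim_equal_select_respondents_from_weights_py := by
  intro states rw _
  unfold Spec_select_respondents_from_weights_py
  unfold select_respondents_from_weights_py select_respondents_from_weights_py_alt pvBuildIndex
  simp only []
  rw [PySem.List.sorted_id_eq_sorted_id_iff_perm]
  apply (List.perm_ext_iff_of_nodup _ _).2
  · intro a
    rw [mem_foldl_add_if, mem_foldl_update]
    simp only [mem_getD_index]
    simp only [PySem.Dict.getD_empty, PySem.Set.empty, List.not_mem_nil, false_or,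
      PySem.Set.mem_ofList]
    constructor
    · rintro ⟨p, hp, hc, rfl⟩
      obtain ⟨x, hxs, hxk⟩ := (inter_ne_nil_iff _ _).1 hc
      exact ⟨x, (PySem.Set.mem_ofList _ _).1 hxs, p, hp, rfl, hxk⟩
    · rintro ⟨st, hst, p, hp, rfl, hk⟩
      exact ⟨p, hp, (inter_ne_nil_iff _ _).2 ⟨st, (PySem.Set.mem_ofList _ _).2 hst, hk⟩, rfl⟩
  · exact nodup_foldl_add_if _ _ _ List.nodup_nil
  · exact nodup_foldl_update _ _ _ List.nodup_nil
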